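-- pv_equiv track=rewrite | github.com/Fantaskink/Audiobook-Generator | src/audiobookgenerator.py | remove_newlines
-- ===== SOURCE A (Python) =====
-- def remove_newlines(string):
--     """
--     Remove occurrences of "\n\n" that aren't preceded by any of ".!?".
--     """
--     result = ''
--     for i in range(len(string)):
--         if i < len(string) - 1 and string[i] == '\n' and string[i+1] == '\n':
--             if i > 0 and string[i-1] in ".!?":
--                 result += string[i]
--             elif i == 0:
--                 result += string[i]
--         else:
--             result += string[i]
--     return result
-- ===== SOURCE B (Python) =====
-- def remove_newlines(string):
--     # Run-based scan: collapse each maximal run of 2+ newlines to "\n\n" when it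
--     # follows start-of-string or sentence punctuation, else to "\n"; copy
--     # everything else segment-wise.
--     parts = []
--     ok = True          # start of string counts like sentence punctuation
--     rest = string
--     while rest:
--         if rest[0] == '\n':
--             run = len(rest) - len(rest.lstrip('\n'))
--             parts.append('\n\n' if run >= 2 and ok else '\n')
--             rest = rest[run:]
--             ok = False
--         else:
--             k = rest.find('\n')
--             seg = rest if k == -1 else rest[:k]
--             parts.append(seg)
--             ok = seg[-1] in '.!?'
--             rest = rest[len(seg):]
--     return ''.join(parts)
-- ===== Notes on version B (the rewrite author's own statement) =====
-- stated objective: faster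
-- what changed: B replaces A's per-character index loop (with lookahead and lookbehind at every position) by a run-based scan that copies whole non-newline segments and collapses each maximal newline run in one step, joining the parts at the end.
import Mathlib
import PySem

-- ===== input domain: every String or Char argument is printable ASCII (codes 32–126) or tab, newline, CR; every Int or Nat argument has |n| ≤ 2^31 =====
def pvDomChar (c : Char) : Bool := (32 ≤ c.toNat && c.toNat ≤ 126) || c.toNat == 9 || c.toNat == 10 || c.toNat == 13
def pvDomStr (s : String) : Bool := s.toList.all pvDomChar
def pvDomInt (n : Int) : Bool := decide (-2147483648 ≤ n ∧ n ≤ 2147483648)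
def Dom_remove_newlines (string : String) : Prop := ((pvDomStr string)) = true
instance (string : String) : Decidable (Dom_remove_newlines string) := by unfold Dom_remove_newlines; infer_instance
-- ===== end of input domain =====

-- B collapses each maximal newline run in one step and copies non-newline segments whole instead of A's per-character index loop; same result, measurably faster by constant factor.

-- ===== PORT A =====
-- A: for i in range(len(string)): keep string[i] unless it starts a "\n\n" pair not preceded by ".!?" (i>0).
def pvBodyA (s : List Char) (n : Nat) (result : List Char) (i : Nat) : List Char :=
  if i < n - 1 ∧ s.getD i ' ' = '\n' ∧ s.getD (i+1) ' ' = '\n' then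
    if 0 < i ∧ s.getD (i-1) ' ' ∈ ['.', '!', '?'] then result ++ [s.getD i ' ']
    else if i = 0 then result ++ [s.getD i ' ']
    else result
  else result ++ [s.getD i ' ']

def remove_newlines (string : String) : String :=
  let s := string.toList
  ((List.range s.length).foldl (pvBodyA s s.length) []).asString

-- ===== PORT B =====
-- B's while loop over the remaining string, carrying the 'ok' flag (start-of-string or prev char in ".!?").
def pvAltGo (ok : Bool) (rest : List Char) : List Char :=
  match rest with
  | [] => []
  | c :: tl =>
    if c = '\n' then
      let run := ((c :: tl).takeWhile (· = '\n')).length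
      (if 2 ≤ run ∧ ok = true then ['\n', '\n'] else ['\n']) ++ pvAltGo false ((c :: tl).drop run)
    else
      let seg := (c :: tl).takeWhile (· ≠ '\n')
      seg ++ pvAltGo (decide (seg.getLast? = some '.' ∨ seg.getLast? = some '!' ∨ seg.getLast? = some '?')) ((c :: tl).drop seg.length)
termination_by rest.length
decreasing_by
  · simp only [List.length_drop, List.length_cons]
    have h1 : 1 ≤ ((c :: tl).takeWhile (· = '\n')).length := by
      simp [*]
    omega
  · simp only [List.length_drop, List.length_cons]
    have h1 : 1 ≤ ((c :: tl).takeWhile (· ≠ '\n')).length := by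
      simp [*]
    omega

def remove_newlines_alt (string : String) : String :=
  (pvAltGo true string.toList).asString

-- ===== PRECONDITION & SPEC =====
def Spec_remove_newlines (string : String) (out : String) : Prop := out = remove_newlines_alt string
instance (string : String) (out : String) : Decidable (Spec_remove_newlines string out) := by unfold Spec_remove_newlines; infer_instance

-- ===== CLAIM (what is proved, stated in full; the proofs are below) =====
def Claim_equal_remove_newlines : Prop := ∀ (string : String), Dom_remove_newlines string → Spec_remove_newlines string (remove_newlines string)

-- ===== LEMMAS AND PROOFS =====

-- reference charwise recursion both ports reduce to
def pvPunct (c : Char) : Bool := c = '.' || c = '!' || c = '?'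

def pvGo (ok : Bool) : List Char → List Char
  | [] => []
  | [c] => [c]
  | c :: d :: rest =>
    if c = '\n' ∧ d = '\n' then
      (if ok then [c] else []) ++ pvGo (pvPunct c) (d :: rest)
    else c :: pvGo (pvPunct c) (d :: rest)

def pvOkAt (t : List Char) (i : Nat) : Bool :=
  if i = 0 then true else pvPunct (t.getD (i - 1) ' ')

lemma pvPunct_mem (x : Char) : (x ∈ ['.', '!', '?']) ↔ pvPunct x = true := by
  simp [pvPunct, or_assoc]

lemma pvGo_run : ∀ (r : Nat), 1 ≤ r → ∀ (t : List Char) (ok : Bool),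
    (∀ d, t.head? = some d → d ≠ '\n') →
    pvGo ok (List.replicate r '\n' ++ t) =
      (if 2 ≤ r ∧ ok = true then ['\n', '\n'] else ['\n']) ++ pvGo false t := by
  intro r
  induction r with
  | zero => omega
  | succ k ih =>
    intro _ t ok ht
    by_cases hk : 1 ≤ k
    · obtain ⟨k', rfl⟩ : ∃ k', k = k' + 1 := ⟨k - 1, by omega⟩
      rw [List.replicate_succ, List.replicate_succ, List.cons_append, List.cons_append]
      simp only [pvGo, show pvPunct '\n' = false from by decide, and_self, if_true]
      rw [← List.cons_append, ← List.replicate_succ]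
      rw [ih hk t false ht]
      have h2 : 2 ≤ k' + 1 + 1 := by omega
      rcases Bool.eq_false_or_eq_true ok with h | h <;> subst h <;> simp [h2]
    · have hk0 : k = 0 := by omega
      subst hk0
      simp only [List.replicate_succ, List.replicate_zero, List.cons_append, List.nil_append]
      cases t with
      | nil => simp [pvGo]
      | cons d u =>
        have hd : d ≠ '\n' := ht d rfl
        simp [pvGo, hd, show pvPunct '\n' = false from by decide]

lemma pvGo_seg : ∀ (seg : List Char) (h : seg ≠ []) (t : List Char) (ok : Bool),
    (∀ c ∈ seg, c ≠ '\n') →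
    pvGo ok (seg ++ t) = seg ++ pvGo (pvPunct (seg.getLast h)) t := by
  intro seg
  induction seg with
  | nil => intro h; exact absurd rfl h
  | cons c rest ih =>
    intro h t ok hall
    have hc : c ≠ '\n' := hall c (by simp)
    cases rest with
    | nil =>
      cases t with
      | nil => simp [pvGo]
      | cons d u => simp [pvGo, hc]
    | cons c2 r2 =>
      have hne : (c2 :: r2 : List Char) ≠ [] := by simp
      rw [List.cons_append]
      rw [show ((c2 :: r2 : List Char) ++ t) = c2 :: (r2 ++ t) from rfl]
      simp only [pvGo]
      rw [if_neg (by intro hh; exact hc hh.1)]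
      rw [show (c2 :: (r2 ++ t)) = (c2 :: r2) ++ t from rfl]
      rw [ih hne t (pvPunct c) (fun x hx => hall x (by simp [hx]))]
      rw [List.getLast_cons hne]
      simp

lemma pvAltGo_eq_pvGo_aux : ∀ (n : Nat) (s : List Char), s.length ≤ n → ∀ ok,
    pvAltGo ok s = pvGo ok s := by
  intro n
  induction n with
  | zero =>
    intro s hs ok
    have hnil : s = [] := by
      cases s with
      | nil => rfl
      | cons a b => simp at hs
    subst hnil
    simp [pvAltGo, pvGo]
  | succ m ih =>
    intro s hs ok
    cases s with
    | nil => simp [pvAltGo, pvGo]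
    | cons c tl =>
      by_cases hc : c = '\n'
      · subst hc
        simp only [pvAltGo]
        have hw : ('\n' :: tl : List Char).takeWhile (· = '\n') =
            List.replicate (('\n' :: tl : List Char).takeWhile (· = '\n')).length '\n' := by
          rw [List.eq_replicate_iff]
          refine ⟨rfl, fun b hb => ?_⟩
          simpa using List.mem_takeWhile_imp hb
        have hsplit := List.takeWhile_append_dropWhile (p := (· = '\n')) (l := '\n' :: tl)
        have hdrop := List.drop_left
          (l₁ := ('\n' :: tl : List Char).takeWhile (· = '\n'))
          (l₂ := ('\n' :: tl : List Char).dropWhile (· = '\n'))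
        rw [hsplit] at hdrop
        have hlen1 : 1 ≤ (('\n' :: tl : List Char).takeWhile (· = '\n')).length := by
          rw [List.takeWhile_cons_of_pos (by simp)]
          simp
        have hdlen : (('\n' :: tl : List Char).dropWhile (· = '\n')).length ≤ m := by
          have hlen := congrArg List.length hsplit
          simp only [List.length_append] at hlen
          simp only [List.length_cons] at hlen hs
          omega
        have hhd : ∀ d, (('\n' :: tl : List Char).dropWhile (· = '\n')).head? = some d →
            d ≠ '\n' := by
          intro d hd hdeq
          have hnot := List.head?_dropWhile_not (fun x : Char => decide (x = '\n')) ('\n' :: tl)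
          rw [hd] at hnot
          simp only [decide_eq_false_iff_not] at hnot
          exact hnot hdeq
        rw [hdrop, ih _ hdlen false]
        conv_rhs => rw [← hsplit, hw]
        rw [pvGo_run _ hlen1 _ ok hhd]
        simp
      · simp only [pvAltGo, if_neg hc]
        have hall : ∀ x ∈ (c :: tl : List Char).takeWhile (· ≠ '\n'), x ≠ '\n' := by
          intro x hx
          simpa using List.mem_takeWhile_imp hx
        have hne : (c :: tl : List Char).takeWhile (· ≠ '\n') ≠ [] := by
          rw [List.takeWhile_cons_of_pos (by simp [hc])]
          simp
        have hsplit := List.takeWhile_append_dropWhile (p := (· ≠ '\n')) (l := c :: tl)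
        have hdrop := List.drop_left
          (l₁ := (c :: tl : List Char).takeWhile (· ≠ '\n'))
          (l₂ := (c :: tl : List Char).dropWhile (· ≠ '\n'))
        rw [hsplit] at hdrop
        have hdlen : ((c :: tl : List Char).dropWhile (· ≠ '\n')).length ≤ m := by
          have hlen := congrArg List.length hsplit
          simp only [List.length_append] at hlen
          simp only [List.length_cons] at hlen hs
          have h1 : 1 ≤ ((c :: tl : List Char).takeWhile (· ≠ '\n')).length := by
            rw [List.takeWhile_cons_of_pos (by simp [hc])]
            simp
          omega
        rw [hdrop, ih _ hdlen]
        conv_rhs => rw [← hsplit]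
        rw [pvGo_seg _ hne _ _ hall]
        congr 2
        rw [List.getLast?_eq_some_getLast hne]
        simp [pvPunct, Bool.or_assoc]

lemma pvAltGo_eq_pvGo (s : List Char) (ok : Bool) : pvAltGo ok s = pvGo ok s :=
  pvAltGo_eq_pvGo_aux s.length s le_rfl ok

lemma pvFoldA (t : List Char) : ∀ (k i : Nat) (acc : List Char), t.length = i + k →
    (List.range' i k).foldl (pvBodyA t t.length) acc =
      acc ++ pvGo (pvOkAt t i) (t.drop i) := by
  intro k
  induction k with
  | zero =>
    intro i acc hik
    have hnil : t.drop i = [] := by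
      rw [List.drop_eq_nil_iff]
      omega
    simp [hnil, pvGo]
  | succ k ih =>
    intro i acc hik
    have hi : i < t.length := by omega
    rw [List.range'_succ, List.foldl_cons]
    rw [ih (i + 1) _ (by omega)]
    have hdropi := List.drop_eq_getElem_cons hi
    have hgdi : t.getD i ' ' = t[i] := List.getD_eq_getElem t ' ' hi
    have hok1 : pvOkAt t (i + 1) = pvPunct (t.getD i ' ') := by
      simp [pvOkAt]
    cases k with
    | zero =>
      have hcond : ¬ (i < t.length - 1 ∧ t.getD i ' ' = '\n' ∧ t.getD (i+1) ' ' = '\n') := by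
        intro hh
        omega
      have hdrop1 : t.drop (i + 1) = [] := by
        rw [List.drop_eq_nil_iff]
        omega
      rw [pvBodyA, if_neg hcond, hdropi, hdrop1]
      simp [pvGo, List.getElem?_eq_getElem hi]
    | succ k' =>
      have hi1 : i + 1 < t.length := by omega
      have hdropi1 := List.drop_eq_getElem_cons hi1
      have hgdi1 : t.getD (i + 1) ' ' = t[i+1] := List.getD_eq_getElem t ' ' hi1
      have hlt : i < t.length - 1 := by omega
      rw [hdropi, hdropi1]
      simp only [pvGo]
      rw [pvBodyA, hok1, ← hgdi, ← hgdi1]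
      by_cases hnn : t.getD i ' ' = '\n' ∧ t.getD (i+1) ' ' = '\n'
      · rw [if_pos ⟨hlt, hnn⟩, if_pos hnn]
        by_cases h0 : i = 0
        · subst h0
          rw [if_neg (by simp : ¬ ((0:ℕ) > 0 ∧ t.getD (0-1) ' ' ∈ ['.', '!', '?']))]
          rw [if_pos rfl]
          have hoktrue : pvOkAt t 0 = true := by simp [pvOkAt]
          rw [hoktrue]
          simp
        · have hokat : pvOkAt t i = pvPunct (t.getD (i - 1) ' ') := by simp [pvOkAt, h0]
          rw [hokat]
          by_cases hp : t.getD (i-1) ' ' ∈ ['.', '!', '?']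
          · rw [if_pos ⟨Nat.pos_of_ne_zero h0, hp⟩, (pvPunct_mem _).mp hp]
            simp
          · rw [if_neg (fun hh => hp hh.2), if_neg h0]
            rw [Bool.eq_false_iff.mpr (fun hT => hp ((pvPunct_mem _).mpr hT))]
            simp
      · rw [if_neg (fun hh => hnn hh.2), if_neg hnn]
        simp

-- ===== VERDICT (by name: the statement is the Claim_ definition above) =====
theorem remove_newlines_spec : Claim_equal_remove_newlines := by
  intro string _
  unfold Spec_remove_newlines
  show (List.foldl (pvBodyA string.toList string.toList.length) []
      (List.range string.toList.length)).asString = (pvAltGo true string.toList).asString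
  congr 1
  rw [List.range_eq_range']
  rw [pvFoldA string.toList string.toList.length 0 [] (by omega)]
  rw [pvAltGo_eq_pvGo]
  simp [pvOkAt]
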